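-- pv_equiv track=rewrite | github.com/JisooJune/algorithm_design_analysis | fig/hw2/7.py | f
-- ===== SOURCE A (Python) =====
-- def f(houses):
--     if not houses:
--         return 0, []
--
--     n = len(houses)
--     stations = []
--     i = 0
--
--     while i < n:
--         station_pos = houses[i]
--         stations.append(station_pos)
--         while i < n and houses[i] <= station_pos + 4:
--             i += 1
--     return len(stations), stations
-- ===== SOURCE B (Python) =====
-- def uncovered(lst, p):
--     # the suffix of lst starting at its first element greater than p
--     for k, x in enumerate(lst):
--         if x > p:
--             return lst[k:]
--     return []
--
-- def f(houses):
--     # worklist of suffixes: take the head of the remaining suffix as a station,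
--     # replace the suffix by its uncovered part, repeat until it is empty
--     stations = []
--     rest = houses
--     while rest:
--         stations.append(rest[0])
--         rest = uncovered(rest[1:], rest[0] + 4)
--     return len(stations), stations
-- ===== Notes on version B (the rewrite author's own statement) =====
-- stated objective: alternative
-- what changed: Replaces A's index-driven nested while loops with a worklist of list suffixes: a helper returns the uncovered suffix (from the first element beyond the covered range), and the main loop repeatedly takes the head of the remaining suffix as a station and shrinks the worklist, with no indices and no nested loop; the suffix slices cost O(n) per station, so B trades asymptotic speed on large many-station inputs for this structure.
import Mathlib
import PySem

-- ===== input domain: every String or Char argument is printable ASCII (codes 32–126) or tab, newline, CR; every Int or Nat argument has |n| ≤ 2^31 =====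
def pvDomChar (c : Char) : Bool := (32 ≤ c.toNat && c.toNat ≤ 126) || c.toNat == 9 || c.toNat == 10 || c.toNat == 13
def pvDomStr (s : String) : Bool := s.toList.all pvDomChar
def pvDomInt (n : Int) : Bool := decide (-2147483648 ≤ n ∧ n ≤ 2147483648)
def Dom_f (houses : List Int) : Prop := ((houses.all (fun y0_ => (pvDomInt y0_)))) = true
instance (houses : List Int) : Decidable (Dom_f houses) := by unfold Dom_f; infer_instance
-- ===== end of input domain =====

-- B replaces A's index-driven nested while loops by a worklist of list suffixes
-- (helper returning the uncovered suffix; no indices, no nested loop) — objective: alternative.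

-- ===== PORT A =====
-- inner while: advance i while i < n and houses[i] <= station_pos + 4
def fInner (houses : List Int) (pos : Int) (i : Nat) : Nat :=
  if h : i < houses.length ∧ houses[i]! ≤ pos + 4 then
    fInner houses pos (i + 1)
  else i
termination_by houses.length - i
decreasing_by omega

theorem fInner_gt (houses : List Int) (pos : Int) (i : Nat)
    (h : i < houses.length) (h2 : houses[i]! ≤ pos + 4) : i < fInner houses pos i := by
  rw [fInner]
  simp only [h, h2, and_self, dif_pos]
  have : ∀ j, i + 1 ≤ j → i + 1 ≤ fInner houses pos j := by
    intro j hj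
    induction j using fInner.induct houses pos with
    | case1 j hc ih => rw [fInner]; simp only [hc]; exact ih (by omega)
    | case2 j hc => rw [fInner]; simp only [hc, dif_neg, not_false_iff]; omega
  exact this (i + 1) (le_refl _)

-- outer while over index i, accumulating stations
def fOuter (houses : List Int) (i : Nat) (stations : List Int) : List Int :=
  if h : i < houses.length then
    let pos := houses[i]!
    fOuter houses (fInner houses pos i) (stations ++ [pos])
  else stations
termination_by houses.length - i
decreasing_by
  have := fInner_gt houses houses[i]! i h (by omega)
  omega

def f (houses : List Int) : Int × List Int :=
  if houses = [] then (0, [])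
  else
    let stations := fOuter houses 0 []
    ((stations.length : Int), stations)

-- ===== PORT B =====
-- helper: the suffix of lst starting at its first element greater than p (else [])
def fUncovered : List Int → Int → List Int
  | [], _ => []
  | x :: t, p => if x > p then x :: t else fUncovered t p

theorem fUncovered_length_le (lst : List Int) (p : Int) :
    (fUncovered lst p).length ≤ lst.length := by
  induction lst with
  | nil => simp [fUncovered]
  | cons x t ih =>
    simp only [fUncovered]
    split
    · simp
    · simp; omega

-- worklist loop: pop the head of the remaining suffix, shrink to its uncovered part
def fAltLoop (rest : List Int) (stations : List Int) : List Int :=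
  match rest with
  | [] => stations
  | r0 :: rt => fAltLoop (fUncovered rt (r0 + 4)) (stations ++ [r0])
termination_by rest.length
decreasing_by
  have := fUncovered_length_le rt (r0 + 4)
  simp; omega

def f_alt (houses : List Int) : Int × List Int :=
  let stations := fAltLoop houses []
  ((stations.length : Int), stations)

-- ===== PRECONDITION & SPEC =====
def Spec_f (houses : List Int) (out : Int × List Int) : Prop := out = f_alt houses
instance (houses : List Int) (out : Int × List Int) : Decidable (Spec_f houses out) := by unfold Spec_f; infer_instance

-- ===== CLAIM (what is proved, stated in full; the proofs are below) =====
def Claim_equal_f : Prop := ∀ (houses : List Int), Dom_f houses → Spec_f houses (f houses)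

-- ===== LEMMAS AND PROOFS =====

-- canonical greedy: pick head, drop the covered prefix
def g : List Int → List Int
  | [] => []
  | h :: t => h :: g (t.dropWhile (fun x => decide (x ≤ h + 4)))
termination_by l => l.length
decreasing_by
  have := List.length_dropWhile_le (fun x => decide (x ≤ h + 4)) t
  simp; omega

theorem drop_fInner (houses : List Int) (pos : Int) (i : Nat) :
    houses.drop (fInner houses pos i) =
      (houses.drop i).dropWhile (fun x => decide (x ≤ pos + 4)) := by
  induction i using fInner.induct houses pos with
  | case1 i hc ih =>
    obtain ⟨h1, h2⟩ := hc
    rw [fInner]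
    simp only [h1, h2, and_self, dif_pos]
    rw [ih]
    rw [List.drop_eq_getElem_cons h1]
    simp [List.dropWhile, List.getElem!_eq_getElem?_getD, List.getElem?_eq_getElem h1] at h2 ⊢
    simp [h2]
  | case2 i hc =>
    rw [fInner]
    simp only [hc, dif_neg, not_false_iff]
    by_cases h1 : i < houses.length
    · have h2 : ¬ houses[i]! ≤ pos + 4 := by tauto
      simp [List.getElem!_eq_getElem?_getD, List.getElem?_eq_getElem h1] at h2
      rw [List.drop_eq_getElem_cons h1]
      have hdec : decide (houses[i] ≤ pos + 4) = false := by simp; omega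
      simp [List.dropWhile, hdec]
    · rw [List.drop_eq_nil_of_le (by omega)]
      simp

theorem fOuter_eq_g (houses : List Int) (i : Nat) (st : List Int) :
    fOuter houses i st = st ++ g (houses.drop i) := by
  induction i, st using fOuter.induct houses with
  | case1 i st h pos ih =>
    rw [fOuter]
    simp only [h, dif_pos]
    rw [ih]
    rw [List.drop_eq_getElem_cons h]
    have hpos : houses[i]! = houses[i] := by
      simp [List.getElem!_eq_getElem?_getD, List.getElem?_eq_getElem h]
    rw [g]
    rw [drop_fInner]
    rw [List.drop_eq_getElem_cons h]
    have hpos2 : pos = houses[i] := hpos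
    rw [hpos2]
    simp [List.dropWhile]
  | case2 i st h =>
    rw [fOuter]
    simp only [h, dif_neg, not_false_iff]
    rw [List.drop_eq_nil_of_le (by omega)]
    simp [g]

-- B-side: the helper is dropWhile
theorem fUncovered_eq_dropWhile (lst : List Int) (p : Int) :
    fUncovered lst p = lst.dropWhile (fun x => decide (x ≤ p)) := by
  induction lst with
  | nil => simp [fUncovered]
  | cons x t ih =>
    by_cases hc : x > p
    · have : decide (x ≤ p) = false := by simp; omega
      simp [fUncovered, hc, List.dropWhile, this]
    · have : decide (x ≤ p) = true := by simp; omega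
      simp [fUncovered, hc, List.dropWhile, this, ih]

theorem fAltLoop_eq_g (rest : List Int) (st : List Int) :
    fAltLoop rest st = st ++ g rest := by
  induction rest, st using fAltLoop.induct with
  | case1 st => simp [fAltLoop, g]
  | case2 r0 rt st ih =>
    rw [fAltLoop, ih, fUncovered_eq_dropWhile, g]
    simp

-- ===== VERDICT (by name: the statement is the Claim_ definition above) =====
theorem f_spec : Claim_equal_f := by
  intro houses _
  unfold Spec_f
  have hb : f_alt houses = (((g houses).length : Int), g houses) := by
    simp only [f_alt, fAltLoop_eq_g, List.nil_append]
  rw [hb]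
  cases houses with
  | nil => simp [f, g]
  | cons h t =>
    have ha := fOuter_eq_g (h :: t) 0 []
    simp only [List.drop_zero, List.nil_append] at ha
    simp [f, ha]
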